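-- pv_equiv track=rewrite | github.com/love-adela/algorithm-ps | codility/1_2.py | solution
-- ===== SOURCE A (Python) =====
-- def solution(S, T):
--     #대소문자 변형
--     S = S.lower()
--     T = T.lower()
--
--     dic = {}
--     for i in S:
--         if dic.get(i):
--             dic[i] += 1
--         else:
--             dic[i] = 1
--     for i in T:
--         if dic.get(i):
--             dic[i] -= 1
--         else:
--             dic[i] = -1
--
--     for i in dic.values():
--         if i != 0:
--             return False
--     return True
-- ===== SOURCE B (Python) =====
-- def solution(S, T):
--     return sorted(S.lower()) == sorted(T.lower())
-- ===== Notes on version B (the rewrite author's own statement) =====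
-- stated objective: idiomatic
-- what changed: Replaces the hand-built signed frequency dictionary (increment for S, decrement for T, then check all counts are zero) with the standard one-liner comparing sorted(S.lower()) to sorted(T.lower()).
import Mathlib
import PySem

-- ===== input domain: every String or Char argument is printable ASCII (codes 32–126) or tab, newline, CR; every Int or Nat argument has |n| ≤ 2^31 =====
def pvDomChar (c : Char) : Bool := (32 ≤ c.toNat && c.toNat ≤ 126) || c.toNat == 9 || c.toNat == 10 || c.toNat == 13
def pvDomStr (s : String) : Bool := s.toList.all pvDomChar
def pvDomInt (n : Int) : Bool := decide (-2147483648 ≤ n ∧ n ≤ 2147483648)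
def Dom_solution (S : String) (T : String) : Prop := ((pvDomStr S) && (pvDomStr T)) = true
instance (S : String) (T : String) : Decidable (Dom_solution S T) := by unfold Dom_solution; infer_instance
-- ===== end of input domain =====

-- B replaces A's signed frequency-dictionary count with the idiomatic sorted-comparison one-liner.

-- ===== PORT A =====
-- `if dic.get(i):` — truthy iff the key is present with a non-zero value
def pvTruthy (o : Option Int) : Bool :=
  match o with
  | some v => v != 0
  | none => false

def pvStepS (d : PySem.Dict Char Int) (i : Char) : PySem.Dict Char Int :=
  if pvTruthy (d.get? i) then d.insert i (d.getD i 0 + 1) else d.insert i 1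

def pvStepT (d : PySem.Dict Char Int) (i : Char) : PySem.Dict Char Int :=
  if pvTruthy (d.get? i) then d.insert i (d.getD i 0 - 1) else d.insert i (-1)

def solution (S : String) (T : String) : Bool :=
  let s := PySem.Str.lower S
  let t := PySem.Str.lower T
  let d1 := s.toList.foldl pvStepS PySem.Dict.empty
  let d2 := t.toList.foldl pvStepT d1
  -- `for i in dic.values(): if i != 0: return False` then `return True`
  d2.values.all (fun v => v == 0)

-- ===== PORT B =====
def solution_alt (S : String) (T : String) : Bool :=
  PySem.List.sorted (PySem.Str.lower S).toList (fun x => x) false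
    == PySem.List.sorted (PySem.Str.lower T).toList (fun x => x) false

-- ===== PRECONDITION & SPEC =====
def Spec_solution (S : String) (T : String) (out : Bool) : Prop := out = solution_alt S T
instance (S : String) (T : String) (out : Bool) : Decidable (Spec_solution S T out) := by unfold Spec_solution; infer_instance

-- ===== CLAIM (what is proved, stated in full; the proofs are below) =====
def Claim_equal_solution : Prop := ∀ (S : String) (T : String), Dom_solution S T → Spec_solution S T (solution S T)

-- ===== LEMMAS AND PROOFS =====

theorem pvStepS_eq_insert (d : PySem.Dict Char Int) (i : Char) :
    pvStepS d i = d.insert i (if pvTruthy (d.get? i) then d.getD i 0 + 1 else 1) := by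
  unfold pvStepS; split_ifs <;> rfl

theorem pvStepT_eq_insert (d : PySem.Dict Char Int) (i : Char) :
    pvStepT d i = d.insert i (if pvTruthy (d.get? i) then d.getD i 0 - 1 else -1) := by
  unfold pvStepT; split_ifs <;> rfl

-- invariant of the first loop: the dict holds exactly the (positive) counts of the scanned list
theorem loop1_get? (l : List Char) :
    ∀ c : Char, (l.foldl pvStepS PySem.Dict.empty).get? c =
      if l.count c = 0 then none else some ((l.count c : Int)) := by
  induction l using List.reverseRecOn with
  | nil => intro c; simp [PySem.Dict.get?_empty]
  | append_singleton l x ih =>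
    intro c
    rw [List.foldl_append, List.foldl_cons, List.foldl_nil, pvStepS_eq_insert,
      PySem.Dict.get?_insert, PySem.Dict.getD_eq_get?_getD, ih x, ih c]
    have hcnt : (l ++ [x]).count c = if c = x then l.count c + 1 else l.count c := by
      simp [List.count_append, List.count_singleton]
      split_ifs <;> simp_all
    rw [hcnt]
    by_cases h : c = x
    · subst h
      by_cases h0 : l.count c = 0
      · simp [h0, pvTruthy]
      · have hz : ((l.count c : Int)) ≠ 0 := by exact_mod_cast h0
        simp [h0, pvTruthy]
    · simp [h]

-- invariant of the second loop: the dict holds the signed count differences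
theorem loop2_get? (s : List Char) (t : List Char) :
    ∀ c : Char, (t.foldl pvStepT (s.foldl pvStepS PySem.Dict.empty)).get? c =
      if s.count c = 0 ∧ t.count c = 0 then none
      else some ((s.count c : Int) - (t.count c : Int)) := by
  induction t using List.reverseRecOn with
  | nil =>
    intro c
    rw [List.foldl_nil, loop1_get? s c]
    by_cases h0 : s.count c = 0 <;> simp [h0]
  | append_singleton t x ih =>
    intro c
    rw [List.foldl_append, List.foldl_cons, List.foldl_nil, pvStepT_eq_insert,
      PySem.Dict.get?_insert, PySem.Dict.getD_eq_get?_getD, ih x, ih c]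
    have hcnt : (t ++ [x]).count c = if c = x then t.count c + 1 else t.count c := by
      simp [List.count_append, List.count_singleton]
      split_ifs <;> simp_all
    rw [hcnt]
    by_cases h : c = x
    · subst h
      by_cases h0 : s.count c = 0 ∧ t.count c = 0
      · simp [h0.1, h0.2, pvTruthy]
      · by_cases hz : (s.count c : Int) - (t.count c : Int) = 0
        · simp [h0, pvTruthy, hz]
          omega
        · simp [h0, pvTruthy, hz]
          ring
    · simp [h]

theorem loop2_keys_nodup (s : List Char) (t : List Char) :
    (t.foldl pvStepT (s.foldl pvStepS PySem.Dict.empty)).keys.Nodup := by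
  have hfS : pvStepS = fun (d : PySem.Dict Char Int) i =>
      d.insert i (if pvTruthy (d.get? i) then d.getD i 0 + 1 else 1) := by
    funext d i; exact pvStepS_eq_insert d i
  have hfT : pvStepT = fun (d : PySem.Dict Char Int) i =>
      d.insert i (if pvTruthy (d.get? i) then d.getD i 0 - 1 else -1) := by
    funext d i; exact pvStepT_eq_insert d i
  rw [hfS, hfT]
  exact PySem.Dict.nodup_keys_foldl_insert _ _ _
    (PySem.Dict.nodup_keys_foldl_insert _ _ _ PySem.Dict.nodup_keys_empty)

-- A returns true exactly when every character count agrees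
theorem solution_eq_true_iff (S T : String) :
    solution S T = true ↔
      ∀ c : Char, (PySem.Str.lower S).toList.count c = (PySem.Str.lower T).toList.count c := by
  set s := (PySem.Str.lower S).toList with hs
  set t := (PySem.Str.lower T).toList with ht
  set d2 := t.foldl pvStepT (s.foldl pvStepS PySem.Dict.empty) with hd2
  have hsol : solution S T = d2.values.all (fun v => v == 0) := rfl
  have hnd : d2.keys.Nodup := loop2_keys_nodup s t
  rw [hsol, PySem.Dict.values_eq_map_keys d2 hnd 0]
  simp only [List.all_eq_true, List.mem_map, beq_iff_eq]
  constructor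
  · intro h c
    have hg := loop2_get? s t c
    by_cases h0 : s.count c = 0 ∧ t.count c = 0
    · omega
    · have hmem : c ∈ d2.keys := by
        rw [← PySem.Dict.contains_iff_mem_keys, PySem.Dict.contains_eq_isSome_get?, hd2, hg]
        simp [h0]
      have := h (d2.getD c 0) ⟨c, hmem, rfl⟩
      rw [PySem.Dict.getD_eq_get?_getD, hd2, hg] at this
      simp [h0] at this
      omega
  · intro h v hv
    obtain ⟨c, _, rfl⟩ := hv
    rw [PySem.Dict.getD_eq_get?_getD, hd2, loop2_get? s t c]
    by_cases h0 : s.count c = 0 ∧ t.count c = 0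
    · simp [h0]
    · have := h c
      simp [h0]
      omega

-- B returns true exactly when the lowered strings are permutations of each other
theorem solution_alt_eq_true_iff (S T : String) :
    solution_alt S T = true ↔
      (PySem.Str.lower S).toList.Perm (PySem.Str.lower T).toList := by
  unfold solution_alt
  rw [beq_iff_eq]
  exact PySem.List.sorted_id_eq_sorted_id_iff_perm _ _

-- ===== VERDICT (by name: the statement is the Claim_ definition above) =====
theorem solution_spec : Claim_equal_solution := by
  intro S T _
  unfold Spec_solution
  rw [Bool.eq_iff_iff, solution_eq_true_iff, solution_alt_eq_true_iff,
    List.perm_iff_count]
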